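-- pv_equiv track=rewrite | github.com/Bhargav-Rao/12CS406SMSLAB | 5.py | calc_cus
-- ===== SOURCE A (Python) =====
-- def calc_cum(s):
-- 	return [sum(s[:i+1]) for i,_ in enumerate(s)]
--
-- def calc_cus(rand_vals,set_vals):
-- 	temp = []
-- 	for _, v in enumerate(rand_vals):
-- 		for num, iat in enumerate(calc_cum(set_vals)):
-- 			if v< iat:
-- 				temp.append(num+1)
-- 				break
-- 		else:
-- 			temp.append(len(set_vals))
-- 	return temp
-- ===== SOURCE B (Python) =====
-- def calc_cus(rand_vals, set_vals):
--     # Build prefix sums once with a running total (A recomputes them for every random value).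
--     cum = []
--     total = 0
--     for x in set_vals:
--         total += x
--         cum.append(total)
--     n = len(set_vals)
--
--     def first_exceed(v):
--         j = 1
--         for c in cum:
--             if v < c:
--                 return j
--             j += 1
--         return n
--
--     return [first_exceed(v) for v in rand_vals]
-- ===== Notes on version B (the rewrite author's own statement) =====
-- stated objective: faster
-- what changed: B computes the cumulative sums once with a running total and scans that fixed list per random value, instead of A rebuilding all prefix sums (each by summing a slice) for every random value.
import Mathlib
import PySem

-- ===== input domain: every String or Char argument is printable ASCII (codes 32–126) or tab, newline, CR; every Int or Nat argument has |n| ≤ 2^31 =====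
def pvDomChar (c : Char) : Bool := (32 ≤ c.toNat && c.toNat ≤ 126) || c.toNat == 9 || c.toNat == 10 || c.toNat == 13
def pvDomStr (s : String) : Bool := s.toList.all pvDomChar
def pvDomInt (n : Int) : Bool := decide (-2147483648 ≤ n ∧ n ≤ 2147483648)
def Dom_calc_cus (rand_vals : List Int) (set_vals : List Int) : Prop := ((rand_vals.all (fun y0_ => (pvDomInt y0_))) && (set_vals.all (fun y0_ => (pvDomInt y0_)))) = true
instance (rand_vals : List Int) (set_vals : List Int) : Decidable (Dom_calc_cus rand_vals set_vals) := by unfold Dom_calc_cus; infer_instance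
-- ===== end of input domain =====

-- B hoists the prefix sums out of the per-value loop and maintains them by a running total (O(m*n) instead of A's O(m*n^2)); return values identical.

-- ===== PORT A =====
-- calc_cum(s) = [sum(s[:i+1]) for i,_ in enumerate(s)]
def calc_cum (s : List Int) : List Int :=
  (PySem.List.enumerate s 0).map (fun p => (PySem.List.slice s none (some (p.1 + 1))).sum)

-- the inner 'for num, iat in enumerate(...) : if v < iat: append(num+1); break / else: append(len(set_vals))'
def calcCusInnerA (v : Int) (n : Int) : List (Int × Int) → Int
  | [] => n
  | (num, iat) :: rest => if v < iat then num + 1 else calcCusInnerA v n rest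

def calc_cus (rand_vals : List Int) (set_vals : List Int) : List Int :=
  (PySem.List.enumerate rand_vals 0).foldl
    (fun temp p =>
      temp ++ [calcCusInnerA p.2 (set_vals.length : Int)
                 (PySem.List.enumerate (calc_cum set_vals) 0)])
    []

-- ===== PORT B =====
-- running-total prefix sums: cum = []; total = 0; for x: total += x; cum.append(total)
def prefixSumsB (total : Int) : List Int → List Int
  | [] => []
  | x :: rest => (total + x) :: prefixSumsB (total + x) rest

-- first_exceed: j = 1; for c in cum: if v < c: return j; j += 1; return n
def firstExceedB (v : Int) (j : Int) (n : Int) : List Int → Int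
  | [] => n
  | c :: rest => if v < c then j else firstExceedB v (j + 1) n rest

def calc_cus_alt (rand_vals : List Int) (set_vals : List Int) : List Int :=
  let cum := prefixSumsB 0 set_vals
  rand_vals.map (fun v => firstExceedB v 1 (set_vals.length : Int) cum)

-- ===== PRECONDITION & SPEC =====
def Spec_calc_cus (rand_vals : List Int) (set_vals : List Int) (out : List Int) : Prop := out = calc_cus_alt rand_vals set_vals
instance (rand_vals : List Int) (set_vals : List Int) (out : List Int) : Decidable (Spec_calc_cus rand_vals set_vals out) := by unfold Spec_calc_cus; infer_instance

-- ===== CLAIM (what is proved, stated in full; the proofs are below) =====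
def Claim_equal_calc_cus : Prop := ∀ (rand_vals : List Int) (set_vals : List Int), Dom_calc_cus rand_vals set_vals → Spec_calc_cus rand_vals set_vals (calc_cus rand_vals set_vals)

-- ===== LEMMAS AND PROOFS =====

-- A's calc_cum as a map over range of take-sums
theorem calc_cum_eq_range (s : List Int) :
    calc_cum s = (List.range s.length).map (fun i => (s.take (i + 1)).sum) := by
  apply List.ext_getElem
  · simp [calc_cum, PySem.List.length_enumerate]
  · intro k h1 h2
    simp only [calc_cum, List.getElem_map, PySem.List.getElem_enumerate, List.getElem_range]
    have : (0 : Int) + (k : Int) + 1 = ((k + 1 : Nat) : Int) := by push_cast; ring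
    rw [this, PySem.List.slice_to_natCast]

-- B's running-total prefix sums compute the same take-sums
theorem prefixSumsB_eq_range (s : List Int) : ∀ (t : Int),
    prefixSumsB t s = (List.range s.length).map (fun i => t + (s.take (i + 1)).sum) := by
  induction s with
  | nil => intro t; simp [prefixSumsB]
  | cons x rest ih =>
    intro t
    simp only [prefixSumsB, List.length_cons, List.range_succ_eq_map, List.map_cons,
      List.map_map]
    rw [ih (t + x)]
    congr 1
    · simp
    · apply List.map_congr_left
      intro i _
      simp [List.take_succ_cons]
      ring

theorem calc_cum_eq_prefixSumsB (s : List Int) : calc_cum s = prefixSumsB 0 s := by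
  rw [calc_cum_eq_range, prefixSumsB_eq_range]
  simp

-- A's enumerated break-search equals B's counter search, shifted by one
theorem inner_eq (v n : Int) (cum : List Int) : ∀ (k : Int),
    calcCusInnerA v n (PySem.List.enumerate cum k) = firstExceedB v (k + 1) n cum := by
  induction cum with
  | nil => intro k; simp [PySem.List.enumerate_nil, calcCusInnerA, firstExceedB]
  | cons c rest ih =>
    intro k
    rw [PySem.List.enumerate_cons]
    simp only [calcCusInnerA, firstExceedB]
    by_cases h : v < c
    · simp [h]
    · simp [h, ih (k + 1)]

-- A's append-fold over an enumeration is a map of the payloads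
theorem foldl_enumerate_map (h : Int → Int) (l : List Int) : ∀ (s : Int) (init : List Int),
    (PySem.List.enumerate l s).foldl (fun temp p => temp ++ [h p.2]) init = init ++ l.map h := by
  induction l with
  | nil => intro s init; simp [PySem.List.enumerate_nil]
  | cons x rest ih =>
    intro s init
    rw [PySem.List.enumerate_cons]
    simp only [List.foldl_cons, List.map_cons]
    rw [ih (s + 1) (init ++ [h x])]
    simp

-- ===== VERDICT (by name: the statement is the Claim_ definition above) =====
theorem calc_cus_spec : Claim_equal_calc_cus := by
  intro rand_vals set_vals _
  unfold Spec_calc_cus calc_cus calc_cus_alt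
  rw [foldl_enumerate_map
        (fun x => calcCusInnerA x (set_vals.length : Int)
          (PySem.List.enumerate (calc_cum set_vals) 0)) rand_vals 0 []]
  simp only [List.nil_append, calc_cum_eq_prefixSumsB]
  apply List.map_congr_left
  intro v _
  have := inner_eq v (set_vals.length : Int) (prefixSumsB 0 set_vals) 0
  simpa using this
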